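-- pv_equiv track=rewrite | github.com/pypi-data/pypi-mirror-174 | packages/ftThanos/ftThanos-0.0.1-py3-none-any.whl/ftThanos/connector.py | build_endpoint
-- ===== SOURCE A (Python) =====
-- def	build_endpoint(param):
-- 	endpoint = param[0]
-- 	for p in param[1:]:
-- 		if '?' in endpoint:
-- 			endpoint += "&" + p
-- 		else:
-- 			endpoint += "?" + p
-- 	return (endpoint)
-- ===== SOURCE B (Python) =====
-- def build_endpoint(param):
--     if len(param) == 1:
--         return param[0]
--     sep = '&' if '?' in param[0] else '?'
--     return param[0] + sep + '&'.join(param[1:])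
-- ===== Notes on version B (the rewrite author's own statement) =====
-- stated objective: simpler
-- what changed: Decide the first separator once from param[0] and emit the rest with a single '&'.join instead of re-scanning the growing endpoint for '?' and re-concatenating it in every loop iteration.
import Mathlib
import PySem

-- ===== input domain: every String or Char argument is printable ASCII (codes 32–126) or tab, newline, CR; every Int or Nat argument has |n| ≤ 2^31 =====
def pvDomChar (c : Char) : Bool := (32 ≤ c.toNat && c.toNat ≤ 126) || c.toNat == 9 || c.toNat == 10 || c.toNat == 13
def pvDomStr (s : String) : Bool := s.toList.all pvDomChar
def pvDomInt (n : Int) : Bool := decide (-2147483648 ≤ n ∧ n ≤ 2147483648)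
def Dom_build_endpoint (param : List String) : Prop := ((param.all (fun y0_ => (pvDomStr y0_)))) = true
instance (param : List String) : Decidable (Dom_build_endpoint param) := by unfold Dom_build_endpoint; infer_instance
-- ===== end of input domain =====

-- B decides the first separator once from param[0] and emits the rest with one '&'.join; simpler than A's per-iteration rescan of the growing endpoint.

-- ===== PORT A =====
def build_endpoint (param : List String) : String :=
  match param with
  | [] => ""          -- param[0] raises IndexError here; excluded by Pre_
  | e :: rest =>
    rest.foldl (fun endpoint p =>
      if PySem.Str.isIn "?" endpoint then endpoint ++ "&" ++ p
      else endpoint ++ "?" ++ p) e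

-- ===== PORT B =====
def build_endpoint_alt (param : List String) : String :=
  match param with
  | [] => ""          -- B's param[0] raises IndexError here too; excluded by Pre_
  | [x] => x
  | e :: rest =>
    e ++ (if PySem.Str.isIn "?" e then "&" else "?") ++ PySem.Str.join "&" rest

-- ===== PRECONDITION & SPEC =====
-- Pre_ excludes only the empty list, on which both Pythons raise IndexError at param[0].
def Pre_build_endpoint (param : List String) : Prop := param ≠ []
instance (param : List String) : Decidable (Pre_build_endpoint param) := by unfold Pre_build_endpoint; infer_instance
def pvWitness_build_endpoint : List String := ["users", "id=3"]

def Spec_build_endpoint (param : List String) (out : String) : Prop := out = build_endpoint_alt param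
instance (param : List String) (out : String) : Decidable (Spec_build_endpoint param out) := by unfold Spec_build_endpoint; infer_instance

-- ===== CLAIM (what is proved, stated in full; the proofs are below) =====
def Claim_equal_build_endpoint : Prop := ∀ (param : List String), Dom_build_endpoint param → Pre_build_endpoint param → Spec_build_endpoint param (build_endpoint param)

-- ===== LEMMAS AND PROOFS =====

theorem isIn_qm_append_left {s t : String} (h : PySem.Str.isIn "?" s = true) :
    PySem.Str.isIn "?" (s ++ t) = true := by
  rw [PySem.Str.isIn_iff_infix] at h ⊢
  simp only [String.toList_append]
  exact h.trans ⟨[], t.toList, by simp⟩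

theorem isIn_qm_mid (e p : String) : PySem.Str.isIn "?" (e ++ "?" ++ p) = true := by
  rw [PySem.Str.isIn_iff_infix]
  simp only [String.toList_append]
  exact ⟨e.toList, p.toList, by simp⟩

theorem join_amp_cons_cons (p q : String) (ps : List String) :
    PySem.Str.join "&" (p :: q :: ps) = p ++ "&" ++ PySem.Str.join "&" (q :: ps) := by
  apply String.toList_inj.mp
  simp [PySem.Str.join, PySem.Chars.join_cons_cons]

theorem join_amp_singleton (p : String) : PySem.Str.join "&" [p] = p := by
  simp [PySem.Str.join]

theorem foldl_has_qm (ps : List String) (p e : String) (h : PySem.Str.isIn "?" e = true) :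
    (p :: ps).foldl (fun endpoint p => if PySem.Str.isIn "?" endpoint then endpoint ++ "&" ++ p
      else endpoint ++ "?" ++ p) e = e ++ "&" ++ PySem.Str.join "&" (p :: ps) := by
  induction ps generalizing p e with
  | nil => simp only [List.foldl, h, if_true, join_amp_singleton]
  | cons q ps ih =>
    have h2 : PySem.Str.isIn "?" (e ++ "&" ++ p) = true :=
      isIn_qm_append_left (isIn_qm_append_left h)
    calc ((p :: q :: ps).foldl _ e)
        = (q :: ps).foldl _ (e ++ "&" ++ p) := by simp only [List.foldl, h, if_true]
      _ = (e ++ "&" ++ p) ++ "&" ++ PySem.Str.join "&" (q :: ps) := ih q _ h2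
      _ = e ++ "&" ++ PySem.Str.join "&" (p :: q :: ps) := by
          rw [join_amp_cons_cons]
          simp [String.append_assoc]

theorem foldl_no_qm (ps : List String) (p e : String) (h : PySem.Str.isIn "?" e = false) :
    (p :: ps).foldl (fun endpoint p => if PySem.Str.isIn "?" endpoint then endpoint ++ "&" ++ p
      else endpoint ++ "?" ++ p) e = e ++ "?" ++ PySem.Str.join "&" (p :: ps) := by
  cases ps with
  | nil => simp only [List.foldl, h, Bool.false_eq_true, if_false, join_amp_singleton]
  | cons q ps =>
    calc ((p :: q :: ps).foldl _ e)
        = (q :: ps).foldl _ (e ++ "?" ++ p) := by simp only [List.foldl, h, Bool.false_eq_true, if_false]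
      _ = (e ++ "?" ++ p) ++ "&" ++ PySem.Str.join "&" (q :: ps) :=
          foldl_has_qm ps q _ (isIn_qm_mid e p)
      _ = e ++ "?" ++ PySem.Str.join "&" (p :: q :: ps) := by
          rw [join_amp_cons_cons]
          simp [String.append_assoc]

-- ===== VERDICT (by name: the statement is the Claim_ definition above) =====
theorem build_endpoint_spec : Claim_equal_build_endpoint := by
  intro param _ hpre
  unfold Spec_build_endpoint build_endpoint build_endpoint_alt
  match param with
  | [] => exact absurd rfl hpre
  | [x] => simp
  | e :: p :: rest =>
    show (p :: rest).foldl (fun endpoint p => if PySem.Str.isIn "?" endpoint then endpoint ++ "&" ++ p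
        else endpoint ++ "?" ++ p) e
      = (e ++ if PySem.Str.isIn "?" e then "&" else "?") ++ PySem.Str.join "&" (p :: rest)
    by_cases h : PySem.Str.isIn "?" e = true
    · rw [foldl_has_qm rest p e h, h]
      simp [String.append_assoc]
    · rw [foldl_no_qm rest p e (by simpa using h)]
      simp only [h]
      simp [String.append_assoc]
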